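-- pv_equiv track=rewrite | github.com/oxpig/ANARCI | lib/python/anarci/schemes.py | get_cdr3_annotations
-- ===== SOURCE A (Python) =====
-- def get_cdr3_annotations(length, scheme="imgt", chain_type=""):
--     """
--     Given a length of a cdr3 give back a list of the annotations that should be applied to the sequence.
--
--     This function should be depreciated
--     """
--     az = "ABCDEFGHIJKLMNOPQRSTUVWXYZ"
--     za = "ZYXWVUTSRQPONMLKJIHGFEDCBA"
--
--     if scheme=="imgt":
--         start, end = 105, 118 # start (inclusive) end (exclusive)
--         annotations = [None for _ in range(max(length,13))]
--         front = 0
--         back  = -1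
--         assert (length-13) < 50, "Too many insertions for numbering scheme to handle" # We ran out of letters.
--         for i in range(min(length,13)):
--             if i%2:
--                 annotations[back] = (end+back, " ")
--                 back -= 1
--             else:
--                 annotations[front] = (start+front, " ")
--                 front += 1
--         for i in range(max(0,length-13)): # add insertions onto 111 and 112 in turn
--             if i%2:
--                 annotations[back] = (112, za[back+6])
--                 back-=1
--             else:
--                 annotations[front] = (111, az[front-7])
--                 front +=1
--         return annotations
--
--     elif scheme in [ "chothia", "kabat"] and chain_type=="heavy": # For chothia and kabat
--         # Number forwards from 93
--         insertions = max(length - 10, 0)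
--         assert insertions < 27, "Too many insertions for numbering scheme to handle" # We ran out of letters.
--         ordered_deletions = [ (100, ' '), (99,' '), (98,' '), (97,' '), (96,' '), (95,' '), (101,' '),(102,' '),(94,' '), (93,' ') ]
--         annotations = sorted( ordered_deletions[ max(0, 10-length): ] + [ (100,a) for a in az[:insertions ] ] )
--         return annotations
--
--     elif scheme in [ "chothia", "kabat"] and chain_type=="light":
--         # Number forwards from 89
--         insertions = max(length - 9, 0)
--         assert insertions < 27, "Too many insertions for numbering scheme to handle" # We ran out of letters.
--         ordered_deletions = [ (95,' '),(94,' '),(93,' '),( 92,' '),(91,' '),(96,' '),(97,' '),(90,' '),(89,' ') ]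
--         annotations = sorted( ordered_deletions[ max(0, 9-length): ] + [ (95,a) for a in az[:insertions ] ] )
--         return annotations
--
--     else:
--         raise AssertionError("Unimplemented scheme")
-- ===== SOURCE B (Python) =====
-- def get_cdr3_annotations(length, scheme="imgt", chain_type=""):
--     """Offset-arithmetic reconstruction: build the annotation list directly in
--     its final order instead of mutating with front/back pointers or sorting."""
--     az = "ABCDEFGHIJKLMNOPQRSTUVWXYZ"
--
--     if scheme == "imgt":
--         assert (length - 13) < 50, "Too many insertions for numbering scheme to handle"
--         m = min(max(length, 0), 13)          # ordinary positions filled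
--         e = max(length - 13, 0)              # insertion letters needed
--         f, b = (m + 1) // 2, m // 2          # front / back ordinary counts
--         fe, be = (e + 1) // 2, e // 2        # front / back insertion counts
--         front = [(105 + j, ' ') for j in range(f)] + [(111, az[j]) for j in range(fe)]
--         back = [(117 - j, ' ') for j in range(b)] + [(112, az[j]) for j in range(be)]
--         gap = max(length, 13) - len(front) - len(back)
--         return front + [None] * gap + back[::-1]
--
--     elif scheme in ("chothia", "kabat") and chain_type == "heavy":
--         insertions = max(length - 10, 0)
--         assert insertions < 27, "Too many insertions for numbering scheme to handle"
--         kept = set([93, 94, 102, 101, 95, 96, 97, 98, 99, 100][:max(min(length, 10), 0)])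
--         return ([(p, ' ') for p in range(93, 101) if p in kept]
--                 + [(100, a) for a in az[:insertions]]
--                 + [(p, ' ') for p in (101, 102) if p in kept])
--
--     elif scheme in ("chothia", "kabat") and chain_type == "light":
--         insertions = max(length - 9, 0)
--         assert insertions < 27, "Too many insertions for numbering scheme to handle"
--         kept = set([89, 90, 97, 96, 91, 92, 93, 94, 95][:max(min(length, 9), 0)])
--         return ([(p, ' ') for p in range(89, 96) if p in kept]
--                 + [(95, a) for a in az[:insertions]]
--                 + [(p, ' ') for p in (96, 97) if p in kept])
--
--     else:
--         raise AssertionError("Unimplemented scheme")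
-- ===== Notes on version B (the rewrite author's own statement) =====
-- stated objective: alternative
-- what changed: A fills a preallocated list via alternating front/back pointer mutation (imgt) and builds scrambled lists that it sorts (chothia/kabat); B computes front/back counts by offset arithmetic and emits every segment of the result directly in its final order, with no pointer mutation and no sort.
import Mathlib
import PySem

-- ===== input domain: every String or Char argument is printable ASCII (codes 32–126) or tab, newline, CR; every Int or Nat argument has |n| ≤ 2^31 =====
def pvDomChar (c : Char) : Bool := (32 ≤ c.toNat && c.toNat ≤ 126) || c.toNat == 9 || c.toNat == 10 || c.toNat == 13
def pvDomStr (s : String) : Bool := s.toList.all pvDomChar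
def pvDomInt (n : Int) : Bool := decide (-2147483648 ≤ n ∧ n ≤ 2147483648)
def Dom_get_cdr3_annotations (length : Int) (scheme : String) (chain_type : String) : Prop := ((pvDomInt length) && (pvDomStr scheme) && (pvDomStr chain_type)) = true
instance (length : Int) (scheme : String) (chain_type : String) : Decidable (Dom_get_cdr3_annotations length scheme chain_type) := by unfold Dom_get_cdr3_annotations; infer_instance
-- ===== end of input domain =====

-- B replaces A's front/back pointer mutation (imgt) and scrambled-list-then-sort builds
-- (chothia/kabat) by direct offset arithmetic that emits each piece of the result in its
-- final order; same return value, different decomposition (objective: alternative).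

-- one-character string from a Python indexing result (s[i] is a 1-char str in Python)
def pvCharStr (o : Option Char) : String := match o with | some c => String.ofList [c] | none => ""

-- ===== PORT A =====
def get_cdr3_annotations (length : Int) (scheme : String) (chain_type : String) : List (Option (Int × String)) :=
  let az := "ABCDEFGHIJKLMNOPQRSTUVWXYZ".toList
  let za := "ZYXWVUTSRQPONMLKJIHGFEDCBA".toList
  if scheme == "imgt" then
    -- start, end = 105, 118
    let annotations : List (Option (Int × String)) := List.replicate (max length 13).toNat none
    -- assert length - 13 < 50 : excluded by Pre_
    let st1 := (PySem.List.pyRange 0 (min length 13) 1).foldl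
      (fun (st : List (Option (Int × String)) × Int × Int) i =>
        if PySem.Int.mod i 2 ≠ 0 then
          (PySem.List.pySetD st.1 st.2.2 (some (118 + st.2.2, " ")), st.2.1, st.2.2 - 1)
        else
          (PySem.List.pySetD st.1 st.2.1 (some (105 + st.2.1, " ")), st.2.1 + 1, st.2.2))
      (annotations, 0, -1)
    let st2 := (PySem.List.pyRange 0 (max 0 (length - 13)) 1).foldl
      (fun (st : List (Option (Int × String)) × Int × Int) i =>
        if PySem.Int.mod i 2 ≠ 0 then
          (PySem.List.pySetD st.1 st.2.2 (some (112, pvCharStr (PySem.List.pyGet? za (st.2.2 + 6)))), st.2.1, st.2.2 - 1)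
        else
          (PySem.List.pySetD st.1 st.2.1 (some (111, pvCharStr (PySem.List.pyGet? az (st.2.1 - 7)))), st.2.1 + 1, st.2.2))
      st1
    st2.1
  else if (scheme == "chothia" || scheme == "kabat") && chain_type == "heavy" then
    let insertions := max (length - 10) 0
    -- assert insertions < 27 : excluded by Pre_
    -- Python's sorted on (int, str) tuples: str comparison is code-point lexicographic,
    -- i.e. '<' on .toList (see PYSEM.md), hence the tuple key (x.1, x.2.toList)
    let ordered_deletions : List (Int × String) :=
      [(100," "),(99," "),(98," "),(97," "),(96," "),(95," "),(101," "),(102," "),(94," "),(93," ")]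
    (PySem.List.sorted2
      (PySem.List.slice ordered_deletions (some (max 0 (10 - length))) none
        ++ (PySem.List.slice az none (some insertions)).map (fun a => ((100 : Int), String.ofList [a])))
      (fun x => x.1) (fun x => x.2.toList) false).map some
  else if (scheme == "chothia" || scheme == "kabat") && chain_type == "light" then
    let insertions := max (length - 9) 0
    -- assert insertions < 27 : excluded by Pre_
    let ordered_deletions : List (Int × String) :=
      [(95," "),(94," "),(93," "),(92," "),(91," "),(96," "),(97," "),(90," "),(89," ")]
    (PySem.List.sorted2
      (PySem.List.slice ordered_deletions (some (max 0 (9 - length))) none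
        ++ (PySem.List.slice az none (some insertions)).map (fun a => ((95 : Int), String.ofList [a])))
      (fun x => x.1) (fun x => x.2.toList) false).map some
  else []  -- raise AssertionError : excluded by Pre_

-- ===== PORT B =====
def get_cdr3_annotations_alt (length : Int) (scheme : String) (chain_type : String) : List (Option (Int × String)) :=
  let az := "ABCDEFGHIJKLMNOPQRSTUVWXYZ".toList
  if scheme == "imgt" then
    -- assert length - 13 < 50 : excluded by Pre_
    let m := min (max length 0) 13
    let e := max (length - 13) 0
    let f := PySem.Int.floordiv (m + 1) 2
    let b := PySem.Int.floordiv m 2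
    let fe := PySem.Int.floordiv (e + 1) 2
    let be := PySem.Int.floordiv e 2
    let front := (PySem.List.pyRange 0 f 1).map (fun j => some ((105 + j, " ") : Int × String))
      ++ (PySem.List.pyRange 0 fe 1).map (fun j => some (((111 : Int), pvCharStr (PySem.List.pyGet? az j)) : Int × String))
    let back := (PySem.List.pyRange 0 b 1).map (fun j => some ((117 - j, " ") : Int × String))
      ++ (PySem.List.pyRange 0 be 1).map (fun j => some (((112 : Int), pvCharStr (PySem.List.pyGet? az j)) : Int × String))
    let gap := max length 13 - (front.length : Int) - (back.length : Int)
    front ++ List.replicate gap.toNat none ++ back.reverse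
  else if (scheme == "chothia" || scheme == "kabat") && chain_type == "heavy" then
    let insertions := max (length - 10) 0
    -- assert insertions < 27 : excluded by Pre_
    let kept := PySem.Set.ofList (PySem.List.slice ([93,94,102,101,95,96,97,98,99,100] : List Int) none (some (max (min length 10) 0)))
    ((PySem.List.pyRange 93 101 1).filter (fun p => PySem.Set.contains kept p)).map (fun p => some ((p, " ") : Int × String))
      ++ (PySem.List.slice az none (some insertions)).map (fun a => some (((100 : Int), String.ofList [a]) : Int × String))
      ++ (([101, 102] : List Int).filter (fun p => PySem.Set.contains kept p)).map (fun p => some ((p, " ") : Int × String))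
  else if (scheme == "chothia" || scheme == "kabat") && chain_type == "light" then
    let insertions := max (length - 9) 0
    -- assert insertions < 27 : excluded by Pre_
    let kept := PySem.Set.ofList (PySem.List.slice ([89,90,97,96,91,92,93,94,95] : List Int) none (some (max (min length 9) 0)))
    ((PySem.List.pyRange 89 96 1).filter (fun p => PySem.Set.contains kept p)).map (fun p => some ((p, " ") : Int × String))
      ++ (PySem.List.slice az none (some insertions)).map (fun a => some (((95 : Int), String.ofList [a]) : Int × String))
      ++ (([96, 97] : List Int).filter (fun p => PySem.Set.contains kept p)).map (fun p => some ((p, " ") : Int × String))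
  else []  -- raise AssertionError : excluded by Pre_

-- ===== PRECONDITION & SPEC =====
-- Pre_ excludes exactly the inputs where A raises an AssertionError: an unimplemented
-- scheme/chain_type combination, or a CDR3 length needing more insertion letters than exist.
def Pre_get_cdr3_annotations (length : Int) (scheme : String) (chain_type : String) : Prop :=
  (scheme = "imgt" ∧ length < 63) ∨
  ((scheme = "chothia" ∨ scheme = "kabat") ∧
    ((chain_type = "heavy" ∧ length < 37) ∨ (chain_type = "light" ∧ length < 36)))
instance (length : Int) (scheme : String) (chain_type : String) : Decidable (Pre_get_cdr3_annotations length scheme chain_type) := by unfold Pre_get_cdr3_annotations; infer_instance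

def pvWitness_get_cdr3_annotations : Int × String × String := (15, "imgt", "")

def Spec_get_cdr3_annotations (length : Int) (scheme : String) (chain_type : String) (out : List (Option (Int × String))) : Prop := out = get_cdr3_annotations_alt length scheme chain_type
instance (length : Int) (scheme : String) (chain_type : String) (out : List (Option (Int × String))) : Decidable (Spec_get_cdr3_annotations length scheme chain_type out) := by unfold Spec_get_cdr3_annotations; infer_instance

-- ===== CLAIM (what is proved, stated in full; the proofs are below) =====
def Claim_equal_get_cdr3_annotations : Prop := ∀ (length : Int) (scheme : String) (chain_type : String), Dom_get_cdr3_annotations length scheme chain_type → Pre_get_cdr3_annotations length scheme chain_type → Spec_get_cdr3_annotations length scheme chain_type (get_cdr3_annotations length scheme chain_type)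

-- ===== LEMMAS AND PROOFS =====

lemma A_imgt_ct (l : Int) (ct : String) :
    get_cdr3_annotations l "imgt" ct = get_cdr3_annotations l "imgt" "" := rfl
lemma B_imgt_ct (l : Int) (ct : String) :
    get_cdr3_annotations_alt l "imgt" ct = get_cdr3_annotations_alt l "imgt" "" := rfl

lemma imgt_neg (l : Int) (hl : l < 0) :
    get_cdr3_annotations l "imgt" "" = get_cdr3_annotations_alt l "imgt" "" := by
  have h1 : min l 13 = l := by omega
  have h2 : max l 13 = (13 : Int) := by omega
  have h3 : max 0 (l - 13) = (0 : Int) := by omega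
  have h3' : max (l - 13) 0 = (0 : Int) := by omega
  have h4 : max l 0 = (0 : Int) := by omega
  simp only [get_cdr3_annotations, get_cdr3_annotations_alt,
    show (("imgt" : String) == "imgt") = true from rfl, if_true]
  rw [h1, h2, h3, h3', h4, PySem.List.pyRange_one_eq_nil hl.le]
  decide

set_option maxRecDepth 8000 in
lemma imgt_eq (l : Int) (h0 : 0 ≤ l) (hl : l < 63) :
    get_cdr3_annotations l "imgt" "" = get_cdr3_annotations_alt l "imgt" "" := by
  interval_cases l <;> decide

lemma A_kh (l : Int) : get_cdr3_annotations l "kabat" "heavy" = get_cdr3_annotations l "chothia" "heavy" := rfl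
lemma B_kh (l : Int) : get_cdr3_annotations_alt l "kabat" "heavy" = get_cdr3_annotations_alt l "chothia" "heavy" := rfl
lemma A_kl (l : Int) : get_cdr3_annotations l "kabat" "light" = get_cdr3_annotations l "chothia" "light" := rfl
lemma B_kl (l : Int) : get_cdr3_annotations_alt l "kabat" "light" = get_cdr3_annotations_alt l "chothia" "light" := rfl

lemma heavy_neg (l : Int) (hl : l < 0) :
    get_cdr3_annotations l "chothia" "heavy" = get_cdr3_annotations_alt l "chothia" "heavy" := by
  have hins : max (l - 10) 0 = (0 : Int) := by omega
  have hk : max (min l 10) 0 = (0 : Int) := by omega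
  have hms : max 0 (10 - l) = 10 - l := by omega
  simp only [get_cdr3_annotations, get_cdr3_annotations_alt,
    show (("chothia" : String) == "imgt") = false from rfl, Bool.false_eq_true, if_false,
    show ((("chothia" : String) == "chothia" || ("chothia" : String) == "kabat")
      && (("heavy" : String) == "heavy")) = true from rfl, if_true]
  rw [hins, hk, hms, PySem.List.slice_from (a := 10 - l) _ (by omega),
    List.drop_eq_nil_of_le (by simp; omega)]
  decide

lemma light_neg (l : Int) (hl : l < 0) :
    get_cdr3_annotations l "chothia" "light" = get_cdr3_annotations_alt l "chothia" "light" := by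
  have hins : max (l - 9) 0 = (0 : Int) := by omega
  have hk : max (min l 9) 0 = (0 : Int) := by omega
  have hms : max 0 (9 - l) = 9 - l := by omega
  simp only [get_cdr3_annotations, get_cdr3_annotations_alt,
    show (("chothia" : String) == "imgt") = false from rfl, Bool.false_eq_true, if_false,
    show ((("chothia" : String) == "chothia" || ("chothia" : String) == "kabat")
      && (("light" : String) == "heavy")) = false from rfl,
    show ((("chothia" : String) == "chothia" || ("chothia" : String) == "kabat")
      && (("light" : String) == "light")) = true from rfl, if_true]
  rw [hins, hk, hms, PySem.List.slice_from (a := 9 - l) _ (by omega),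
    List.drop_eq_nil_of_le (by simp; omega)]
  decide

set_option maxRecDepth 8000 in
lemma heavy_eq (l : Int) (h0 : 0 ≤ l) (hl : l < 37) :
    get_cdr3_annotations l "chothia" "heavy" = get_cdr3_annotations_alt l "chothia" "heavy" := by
  interval_cases l <;> decide

set_option maxRecDepth 8000 in
lemma light_eq (l : Int) (h0 : 0 ≤ l) (hl : l < 36) :
    get_cdr3_annotations l "chothia" "light" = get_cdr3_annotations_alt l "chothia" "light" := by
  interval_cases l <;> decide

-- ===== VERDICT (by name: the statement is the Claim_ definition above) =====
theorem get_cdr3_annotations_spec : Claim_equal_get_cdr3_annotations := by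
  intro l s ct _hdom hpre
  unfold Spec_get_cdr3_annotations
  rcases hpre with ⟨hs, hl⟩ | ⟨hs, ⟨hct, hl⟩ | ⟨hct, hl⟩⟩
  · subst hs
    rw [A_imgt_ct, B_imgt_ct]
    rcases lt_or_ge l 0 with h | h
    · exact imgt_neg l h
    · exact imgt_eq l h hl
  · subst hct
    rcases hs with hs | hs <;> subst hs
    · rcases lt_or_ge l 0 with h | h
      · exact heavy_neg l h
      · exact heavy_eq l h hl
    · rw [A_kh, B_kh]
      rcases lt_or_ge l 0 with h | h
      · exact heavy_neg l h
      · exact heavy_eq l h hl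
  · subst hct
    rcases hs with hs | hs <;> subst hs
    · rcases lt_or_ge l 0 with h | h
      · exact light_neg l h
      · exact light_eq l h hl
    · rw [A_kl, B_kl]
      rcases lt_or_ge l 0 with h | h
      · exact light_neg l h
      · exact light_eq l h hl
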